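-- pv_equiv track=rewrite | github.com/felrock/AdventOfCode2019 | aoc6/task2.py | countNonEqRelation
-- ===== SOURCE A (Python) =====
-- def countNonEqRelation(a, b):
--     # takes two dicts and counts items that are
--     # non similar, looks
--
--     count = 0
--     for key, _ in a.items():
--         if not key in b:
--             count += 1
--
--     for key, _ in b.items():
--         if not key in a:
--             count += 1
--
--     return count
-- ===== SOURCE B (Python) =====
-- def countNonEqRelation(a, b):
--     # Build one multiplicity table over the concatenation of both key lists;
--     # since each dict's keys are unique, a key is unshared iff it occurs exactly once.
--     mult = {}
--     for key in list(a) + list(b):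
--         mult[key] = mult.get(key, 0) + 1
--     return sum(1 for v in mult.values() if v == 1)
-- ===== Notes on version B (the rewrite author's own statement) =====
-- stated objective: alternative
-- what changed: Instead of two loops each testing key membership in the other dict, B builds a single multiplicity table over the concatenation of both key lists and counts the keys of multiplicity exactly 1.
import Mathlib
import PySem

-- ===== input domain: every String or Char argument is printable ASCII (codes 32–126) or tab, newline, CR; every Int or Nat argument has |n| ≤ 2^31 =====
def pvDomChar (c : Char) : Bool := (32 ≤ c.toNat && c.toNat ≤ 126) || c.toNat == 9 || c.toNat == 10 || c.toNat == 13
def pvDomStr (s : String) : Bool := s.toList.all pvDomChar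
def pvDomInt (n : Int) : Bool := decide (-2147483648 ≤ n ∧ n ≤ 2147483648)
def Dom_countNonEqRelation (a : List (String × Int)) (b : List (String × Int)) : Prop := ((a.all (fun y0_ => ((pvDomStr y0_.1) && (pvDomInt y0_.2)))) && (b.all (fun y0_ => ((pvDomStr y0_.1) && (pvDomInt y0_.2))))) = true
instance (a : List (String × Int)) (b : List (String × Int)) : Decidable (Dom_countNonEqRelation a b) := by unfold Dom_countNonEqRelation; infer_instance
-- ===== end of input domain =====

-- B replaces A's two cross-membership loops by one multiplicity table over the concatenated key lists, counting keys of multiplicity 1.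


-- ===== PORT A =====
-- dicts arrive as association lists; PySem.Dict.ofList is Python's dict built from them
def countNonEqRelation (a : List (String × Int)) (b : List (String × Int)) : Int :=
  let da := PySem.Dict.ofList a
  let db := PySem.Dict.ofList b
  -- count = 0; for key, _ in a.items(): if not key in b: count += 1
  let count : Int :=
    da.items.foldl (fun count kv => if !db.contains kv.1 then count + 1 else count) 0
  -- for key, _ in b.items(): if not key in a: count += 1
  let count :=
    db.items.foldl (fun count kv => if !da.contains kv.1 then count + 1 else count) count
  count

-- ===== PORT B =====
-- mult = {}; for key in list(a) + list(b): mult[key] = mult.get(key, 0) + 1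
-- return sum(1 for v in mult.values() if v == 1)
def countNonEqRelation_alt (a : List (String × Int)) (b : List (String × Int)) : Int :=
  let merged := (PySem.Dict.ofList a).keys ++ (PySem.Dict.ofList b).keys
  let mult : PySem.Dict String Int :=
    merged.foldl (fun d key => d.insert key (d.getD key 0 + 1)) PySem.Dict.empty
  mult.values.foldl (fun s v => if v == 1 then s + 1 else s) 0

-- ===== PRECONDITION & SPEC =====
def Spec_countNonEqRelation (a : List (String × Int)) (b : List (String × Int)) (out : Int) : Prop := out = countNonEqRelation_alt a b
instance (a : List (String × Int)) (b : List (String × Int)) (out : Int) : Decidable (Spec_countNonEqRelation a b out) := by unfold Spec_countNonEqRelation; infer_instance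

-- ===== CLAIM (what is proved, stated in full; the proofs are below) =====
def Claim_equal_countNonEqRelation : Prop := ∀ (a : List (String × Int)) (b : List (String × Int)), Dom_countNonEqRelation a b → Spec_countNonEqRelation a b (countNonEqRelation a b)

-- ===== LEMMAS AND PROOFS =====

-- folding Set.add over a duplicate-free list appends exactly the new elements, in order
theorem pv_foldl_set_add (kb : List String) (s : List String) (h : kb.Nodup) :
    kb.foldl PySem.Set.add s = s ++ kb.filter (fun x => !s.contains x) := by
  induction kb generalizing s with
  | nil => simp
  | cons x kb ih =>
    rcases List.nodup_cons.mp h with ⟨hx, hkb⟩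
    rw [List.foldl_cons]
    by_cases hc : x ∈ s
    · have hadd : PySem.Set.add s x = s := by
        simp [PySem.Set.add, PySem.Set.contains_eq_listContains, hc]
      rw [hadd, ih _ hkb, List.filter_cons]
      simp [hc]
    · have hadd : PySem.Set.add s x = s ++ [x] := by
        simp [PySem.Set.add, PySem.Set.contains_eq_listContains, hc]
      rw [hadd, ih _ hkb, List.filter_cons]
      have hfilt : kb.filter (fun y => !(s ++ [x]).contains y)
          = kb.filter (fun y => !s.contains y) := by
        apply List.filter_congr
        intro y hy
        have hyx : y ≠ x := fun e => hx (e ▸ hy)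
        simp [hyx]
      rw [hfilt, List.append_assoc]
      simp [hc]

-- over the dedup of the concatenated key lists, "multiplicity 1" counts exactly the unshared keys
theorem pv_main (ka kb : List String) (hka : ka.Nodup) (hkb : kb.Nodup) :
    List.countP (fun k => ((List.count k (ka ++ kb) : Int) == 1)) (PySem.Set.ofList (ka ++ kb))
      = List.countP (fun k => !kb.contains k) ka + List.countP (fun k => !ka.contains k) kb := by
  have hsplit : PySem.Set.ofList (ka ++ kb) = ka ++ kb.filter (fun x => !ka.contains x) := by
    have h1 : PySem.Set.ofList (ka ++ kb) = kb.foldl PySem.Set.add (PySem.Set.ofList ka) := by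
      rw [PySem.Set.ofList_eq_foldl, PySem.Set.ofList_eq_foldl, List.foldl_append]
    rw [h1, PySem.Set.ofList_eq_self_of_nodup ka hka, pv_foldl_set_add kb ka hkb]
  rw [hsplit, List.countP_append]
  congr 1
  · -- over ka: multiplicity in ka ++ kb is 1 iff the key is not in kb
    apply List.countP_congr
    intro k hk
    have h1 : List.count k ka = 1 := List.count_eq_one_of_mem hka hk
    by_cases hkb' : k ∈ kb
    · have h2 : List.count k kb = 1 := List.count_eq_one_of_mem hkb hkb'
      simp [List.count_append, h1, h2, hkb']
    · have h2 : List.count k kb = 0 := List.count_eq_zero.mpr hkb'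
      simp [List.count_append, h1, h2, hkb']
  · -- over kb: keys outside ka have multiplicity 1
    rw [List.countP_filter]
    apply List.countP_congr
    intro k hk
    by_cases hq : k ∈ ka
    · simp [hq]
    · have h1 : List.count k ka = 0 := List.count_eq_zero.mpr hq
      have h2 : List.count k kb = 1 := List.count_eq_one_of_mem hkb hk
      simp [List.count_append, h1, h2, hq]

-- ===== VERDICT (by name: the statement is the Claim_ definition above) =====
theorem countNonEqRelation_spec : Claim_equal_countNonEqRelation := by
  intro a b _
  unfold Spec_countNonEqRelation countNonEqRelation countNonEqRelation_alt
  simp only [PySem.Dict.foldl_insert_getD_add_one_eq_counter, PySem.List.foldl_count_if]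
  set ka := (PySem.Dict.ofList a).keys with hka_def
  set kb := (PySem.Dict.ofList b).keys with hkb_def
  have hka : ka.Nodup := PySem.Dict.nodup_keys_ofList a
  have hkb : kb.Nodup := PySem.Dict.nodup_keys_ofList b
  -- B side: values of the counter are the multiplicities of the distinct keys
  have hvals : (PySem.Dict.counter (ka ++ kb)).values
      = (PySem.Set.ofList (ka ++ kb)).map (fun k => (List.count k (ka ++ kb) : Int)) := by
    simp [PySem.Dict.values, PySem.Dict.items_counter, List.map_map, Function.comp_def]
  rw [hvals, List.countP_map]
  simp only [Function.comp_def]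
  rw [pv_main ka kb hka hkb]
  -- A side: item-level predicates are key-level predicates
  have hitems : ∀ (ps : List (String × Int)) (d : PySem.Dict String Int),
      List.countP (fun kv => !d.contains kv.1) (PySem.Dict.ofList ps).items
        = List.countP (fun k => !d.contains k) (PySem.Dict.ofList ps).keys := by
    intro ps d
    simp [PySem.Dict.keys, List.countP_map, Function.comp_def]
  have hc : ∀ (d : PySem.Dict String Int) (l : List String),
      List.countP (fun k => !d.contains k) l = List.countP (fun k => !d.keys.contains k) l := by
    intro d l
    apply List.countP_congr
    intro k _
    rw [PySem.Dict.contains_eq_decide_mem_keys, List.contains_eq_mem]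
  rw [hitems a (PySem.Dict.ofList b), hitems b (PySem.Dict.ofList a),
    hc (PySem.Dict.ofList b), hc (PySem.Dict.ofList a), ← hka_def, ← hkb_def]
  push_cast
  ring
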